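-- pv_equiv track=rewrite | github.com/tuanxx31/DACTDLGT | vrpcc/approx_algorithm.py | _concat_depot_tours
-- ===== SOURCE A (Python) =====
-- def _concat_depot_tours(a: list[int], b: list[int]) -> list[int]:
--     """Nối hai tuyến khép kín qua depot: τ_k ← τ_k ∘ A_k (paper line 8)."""
--     if not a:
--         return b[:]
--     if not b:
--         return a[:]
--     if a[-1] == 0 and b[0] == 0:
--         out = a[:-1] + b
--     else:
--         out = a + b
--     slim: list[int] = []
--     for v in out:
--         if v == 0 and slim and slim[-1] == 0:
--             continue
--         slim.append(v)
--     return slim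
-- ===== SOURCE B (Python) =====
-- def _concat_depot_tours(a: list[int], b: list[int]) -> list[int]:
--     if not a:
--         return b[:]
--     if not b:
--         return a[:]
--     c = a + b
--     out: list[int] = []
--     i, n = 0, len(c)
--     while i < n:
--         j = i
--         while j < n and c[j] == c[i]:
--             j += 1
--         if c[i] == 0:
--             out.append(0)
--         else:
--             out.extend(c[i:j])
--         i = j
--     return out
-- ===== Notes on version B (the rewrite author's own statement) =====
-- stated objective: alternative
-- what changed: B drops A's special dropLast/element-by-element last-seen collapse and instead scans the concatenation by maximal runs of equal values (two-pointer run detection), emitting a single 0 per zero run and each non-zero run verbatim.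
import Mathlib
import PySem

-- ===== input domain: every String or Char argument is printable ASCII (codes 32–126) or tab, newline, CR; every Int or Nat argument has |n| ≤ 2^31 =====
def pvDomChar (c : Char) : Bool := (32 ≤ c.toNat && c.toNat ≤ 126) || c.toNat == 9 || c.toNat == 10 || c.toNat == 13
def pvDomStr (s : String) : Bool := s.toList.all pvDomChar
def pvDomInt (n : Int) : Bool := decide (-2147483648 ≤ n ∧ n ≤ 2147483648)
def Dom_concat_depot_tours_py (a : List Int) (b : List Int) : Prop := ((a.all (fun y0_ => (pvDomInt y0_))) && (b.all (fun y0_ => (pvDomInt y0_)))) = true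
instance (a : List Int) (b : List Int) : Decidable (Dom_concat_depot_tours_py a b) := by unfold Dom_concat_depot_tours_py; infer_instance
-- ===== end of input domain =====

-- B replaces A's per-element collapse (with last-appended-value check) by a run-based scan
-- of the concatenation: one 0 per zero run, non-zero runs copied verbatim (objective: alternative).

-- ===== PORT A =====
def concat_depot_tours_py (a : List Int) (b : List Int) : List Int :=
  if a = [] then b
  else if b = [] then a
  else
    let out :=
      if PySem.List.pyGet? a (-1) == some 0 && PySem.List.pyGet? b 0 == some 0 then
        PySem.List.slice a none (some (-1)) ++ b
      else a ++ b
    out.foldl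
      (fun slim v =>
        if v == 0 && !slim.isEmpty && PySem.List.pyGet? slim (-1) == some 0 then slim
        else slim ++ [v]) []

-- ===== PORT B =====
-- inner while loop of Source B: split off the maximal run of elements equal to the head
def pvRuns (xs : List Int) : List (List Int) :=
  match xs with
  | [] => []
  | x :: t => (x :: t.takeWhile (· == x)) :: pvRuns (t.dropWhile (· == x))
termination_by xs.length
decreasing_by simp; exact List.length_dropWhile_le _ _

def concat_depot_tours_py_alt (a : List Int) (b : List Int) : List Int :=
  if a = [] then b
  else if b = [] then a
  else
    (pvRuns (a ++ b)).foldl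
      (fun out g => if g.head? == some 0 then out ++ [0] else out ++ g) []

-- ===== PRECONDITION & SPEC =====
def Spec_concat_depot_tours_py (a : List Int) (b : List Int) (out : List Int) : Prop := out = concat_depot_tours_py_alt a b
instance (a : List Int) (b : List Int) (out : List Int) : Decidable (Spec_concat_depot_tours_py a b out) := by unfold Spec_concat_depot_tours_py; infer_instance

-- ===== CLAIM (what is proved, stated in full; the proofs are below) =====
def Claim_equal_concat_depot_tours_py : Prop := ∀ (a : List Int) (b : List Int), Dom_concat_depot_tours_py a b → Spec_concat_depot_tours_py a b (concat_depot_tours_py a b)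

-- ===== LEMMAS AND PROOFS =====

-- canonical collapse with a "last emitted value was 0" flag
def pvSlim : Bool → List Int → List Int
  | _, [] => []
  | l, v :: t =>
      if v = 0 then (if l then pvSlim true t else 0 :: pvSlim true t)
      else v :: pvSlim false t

-- A's fold computes pvSlim
theorem pvFoldA (xs : List Int) : ∀ acc : List Int,
    xs.foldl
      (fun slim v =>
        if v == 0 && !slim.isEmpty && PySem.List.pyGet? slim (-1) == some 0 then slim
        else slim ++ [v]) acc
    = acc ++ pvSlim (acc.getLast? == some 0) xs := by
  induction xs with
  | nil => intro acc; simp [pvSlim]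
  | cons v t ih =>
    intro acc
    by_cases hv : v = 0
    · subst hv
      by_cases hl : acc.getLast? = some 0
      · have hne : acc ≠ [] := by intro h; subst h; simp at hl
        simp only [List.foldl_cons]
        rw [show (if (0:Int) == 0 && !acc.isEmpty && PySem.List.pyGet? acc (-1) == some 0
              then acc else acc ++ [0]) = acc by
            simp [PySem.List.pyGet?_neg_one, hl, hne]]
        rw [ih acc, hl]
        simp [pvSlim]
      · simp only [List.foldl_cons]
        rw [show (if (0:Int) == 0 && !acc.isEmpty && PySem.List.pyGet? acc (-1) == some 0
              then acc else acc ++ [0]) = acc ++ [0] by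
            simp [PySem.List.pyGet?_neg_one, hl]]
        rw [ih (acc ++ [0])]
        simp [pvSlim, hl]
    · simp only [List.foldl_cons]
      rw [show (if v == 0 && !acc.isEmpty && PySem.List.pyGet? acc (-1) == some 0
            then acc else acc ++ [v]) = acc ++ [v] by simp [hv]]
      rw [ih (acc ++ [v])]
      have hb : ((v == 0) : Bool) = false := by simp [hv]
      simp [pvSlim, hv, hb]

-- B's fold is an append of a flatMap
theorem pvFoldB (gs : List (List Int)) : ∀ init : List Int,
    gs.foldl (fun out g => if g.head? == some 0 then out ++ [0] else out ++ g) init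
    = init ++ gs.flatMap (fun g => if g.head? == some 0 then [0] else g) := by
  induction gs with
  | nil => intro init; simp
  | cons g gs ih =>
    intro init
    rw [List.foldl_cons, ih]
    by_cases h : g.head? = some 0 <;> simp [h]

theorem pvSlim_zeros (r : List Int) (rest : List Int) (h : ∀ v ∈ r, v = 0) :
    pvSlim true (r ++ rest) = pvSlim true rest := by
  induction r with
  | nil => rfl
  | cons v r ih =>
    have hv := h v (by simp)
    simp only [List.cons_append, pvSlim, hv, if_pos trivial]
    exact ih (fun w hw => h w (by simp [hw]))

theorem pvSlim_nonzeros (r : List Int) (rest : List Int) (h : ∀ v ∈ r, v ≠ 0) :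
    pvSlim false (r ++ rest) = r ++ pvSlim false rest := by
  induction r with
  | nil => rfl
  | cons v r ih =>
    have hv := h v (by simp)
    have ih' := ih (fun w hw => h w (by simp [hw]))
    simp [pvSlim, hv, ih']

theorem pvSlim_flag (rest : List Int) (h : rest.head? ≠ some 0) :
    pvSlim true rest = pvSlim false rest := by
  cases rest with
  | nil => rfl
  | cons y t =>
    have hy : y ≠ 0 := by intro hy; exact h (by simp [hy])
    simp [pvSlim, hy]

theorem pvDropWhile_head {p : Int → Bool} : ∀ (t : List Int) (y : Int),
    (t.dropWhile p).head? = some y → p y = false := by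
  intro t
  induction t with
  | nil => intro y h; simp at h
  | cons v t ih =>
    intro y h
    by_cases hv : p v = true
    · exact ih y (by simpa [List.dropWhile_cons, hv] using h)
    · have hv' : p v = false := by simpa using hv
      rw [List.dropWhile_cons, hv'] at h
      simp at h
      subst h
      exact hv'

theorem pvRuns_flat (xs : List Int) :
    (pvRuns xs).flatMap (fun g => if g.head? == some 0 then [0] else g) = pvSlim false xs := by
  induction xs using pvRuns.induct with
  | case1 => simp [pvRuns, pvSlim]
  | case2 x t ih =>
    have hsplit : t.takeWhile (· == x) ++ t.dropWhile (· == x) = t :=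
      List.takeWhile_append_dropWhile
    by_cases hx : x = 0
    · subst hx
      rw [pvRuns]
      simp only [List.flatMap_cons, List.head?_cons,
        if_pos (show ((some (0:Int) == some 0) = true) by decide)]
      rw [ih]
      have hz : ∀ v ∈ t.takeWhile (· == (0:Int)), v = 0 := by
        intro v hv
        simpa using List.mem_takeWhile_imp hv
      have hhd : (t.dropWhile (· == (0:Int))).head? ≠ some 0 := by
        intro h
        have := pvDropWhile_head _ _ h
        simp at this
      calc (0:Int) :: pvSlim false (t.dropWhile (· == (0:Int)))
          = 0 :: pvSlim true (t.dropWhile (· == (0:Int))) := by rw [pvSlim_flag _ hhd]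
        _ = 0 :: pvSlim true (t.takeWhile (· == (0:Int)) ++ t.dropWhile (· == (0:Int))) := by
              rw [pvSlim_zeros _ _ hz]
        _ = 0 :: pvSlim true t := by rw [hsplit]
        _ = pvSlim false (0 :: t) := by simp [pvSlim]
    · rw [pvRuns]
      simp only [List.flatMap_cons, List.head?_cons,
        if_neg (by simp [hx] : ¬((some x == some (0:Int)) = true))]
      rw [ih]
      have hnz : ∀ v ∈ t.takeWhile (· == x), v ≠ 0 := by
        intro v hv h0
        have := List.mem_takeWhile_imp hv
        simp at this
        subst this; exact hx h0
      calc x :: t.takeWhile (· == x) ++ pvSlim false (t.dropWhile (· == x))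
          = x :: (t.takeWhile (· == x) ++ pvSlim false (t.dropWhile (· == x))) := by simp
        _ = x :: pvSlim false (t.takeWhile (· == x) ++ t.dropWhile (· == x)) := by
              rw [pvSlim_nonzeros _ _ hnz]
        _ = x :: pvSlim false t := by rw [hsplit]
        _ = pvSlim false (x :: t) := by simp [pvSlim, hx]

theorem pvSlim_zz (zs : List Int) : ∀ (ys : List Int) (l : Bool),
    pvSlim l (ys ++ 0 :: 0 :: zs) = pvSlim l (ys ++ 0 :: zs) := by
  intro ys
  induction ys with
  | nil => intro l; cases l <;> simp [pvSlim]
  | cons y ys ih =>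
    intro l
    by_cases hy : y = 0
    · subst hy; cases l <;> simp [pvSlim, ih]
    · simp [pvSlim, hy, ih]

-- ===== VERDICT (by name: the statement is the Claim_ definition above) =====
theorem concat_depot_tours_py_spec : Claim_equal_concat_depot_tours_py := by
  intro a b _
  unfold Spec_concat_depot_tours_py concat_depot_tours_py concat_depot_tours_py_alt
  by_cases ha : a = []
  · simp [ha]
  · by_cases hb : b = []
    · simp [ha, hb]
    · simp only [if_neg ha, if_neg hb]
      rw [pvFoldB, List.nil_append, pvRuns_flat]
      by_cases hc : (PySem.List.pyGet? a (-1) == some 0 && PySem.List.pyGet? b 0 == some 0) = true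
      · simp only [if_pos hc]
        rw [pvFoldA]
        simp only [List.getLast?_nil, List.nil_append]
        rw [show ((none : Option Int) == some 0) = false from rfl]
        rw [PySem.List.slice_to_neg_one]
        have hla : a.getLast? = some 0 := by
          have := hc; simp [PySem.List.pyGet?_neg_one] at this; exact this.1
        have hhb : b.head? = some 0 := by
          have := hc; simp [PySem.List.pyGet?_neg_one, PySem.List.pyGet?_zero] at this
          simpa [List.head?_eq_getElem?] using this.2
        obtain ⟨tb, hbeq⟩ : ∃ tb, b = 0 :: tb := by
          cases b with
          | nil => exact absurd rfl hb
          | cons y t => simp at hhb; exact ⟨t, by simp [hhb]⟩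
        have haeq : a.dropLast ++ [0] = a := List.dropLast_append_getLast? 0 hla
        subst hbeq
        conv_rhs => rw [← haeq]
        simp only [List.append_assoc, List.cons_append, List.nil_append]
        exact (pvSlim_zz tb a.dropLast false).symm
      · simp only [if_neg hc]
        rw [pvFoldA]
        simp
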